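-- pv_equiv track=rewrite | github.com/YuanG1944/COMP9021_19T3_ALL | 9021 Python/9021 assignment_1/peoblem2_3.py | fm_even_condition
-- ===== SOURCE A (Python) =====
-- def fm_even_condition(l):
--     a = list(l)
--     for value in range(len(a) - 1):
--         if value % 2 == 1:
--             temp = a[value]
--             a[value] = a[value + 1]
--             a[value + 1] = temp
--     a = ''.join(a)
--     return a
-- ===== SOURCE B (Python) =====
-- def fm_even_condition(l):
--     a = list(l)
--     out = a[:1]
--     for i in range(1, len(a), 2):
--         out += a[i:i+2][::-1]
--     return ''.join(out)
-- ===== Notes on version B (the rewrite author's own statement) =====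
-- stated objective: simpler
-- what changed: A's in-place index loop with parity test and element swapping is replaced by building the output front-to-back: keep the first element, then walk the list with stride 2 appending each two-element slice reversed.
import Mathlib
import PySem

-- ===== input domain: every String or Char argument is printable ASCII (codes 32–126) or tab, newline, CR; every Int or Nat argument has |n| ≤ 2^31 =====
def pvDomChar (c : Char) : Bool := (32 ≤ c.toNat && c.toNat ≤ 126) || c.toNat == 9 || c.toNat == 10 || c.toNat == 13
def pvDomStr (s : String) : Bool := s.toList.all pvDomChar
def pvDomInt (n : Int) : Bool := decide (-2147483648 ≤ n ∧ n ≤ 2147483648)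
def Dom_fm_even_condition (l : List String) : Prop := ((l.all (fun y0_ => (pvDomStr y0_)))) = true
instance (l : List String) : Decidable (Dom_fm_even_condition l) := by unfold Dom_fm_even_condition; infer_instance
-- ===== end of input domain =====

-- B replaces A's in-place index-parity swap loop by a stride-2 chunk-and-reverse traversal (objective: simpler).

-- ===== PORT A =====
-- literal port of A: copy l, for value in range(len(a)-1): if value % 2 == 1: swap a[value], a[value+1]; join.
def fm_even_condition (l : List String) : String :=
  let a := l
  let a := (PySem.List.pyRange 0 ((a.length : Int) - 1) 1).foldl
    (fun a value =>
      if PySem.Int.mod value 2 = 1 then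
        let temp := PySem.List.pyGetD a value ""
        let a := PySem.List.pySetD a value (PySem.List.pyGetD a (value + 1) "")
        let a := PySem.List.pySetD a (value + 1) temp
        a
      else a) a
  PySem.Str.join "" a

-- ===== PORT B =====
-- literal port of Source B: out = a[:1]; for i in range(1, len(a), 2): out += a[i:i+2][::-1]; join.
-- a[i:i+2][::-1] is ported as slice? … (-1) with .getD [] (slice? is none only for step 0, never here).
def fm_even_condition_alt (l : List String) : String :=
  let a := l
  let out := (PySem.List.pyRange 1 (a.length : Int) 2).foldl
    (fun out i =>
      out ++ ((PySem.List.slice? (PySem.List.slice a (some i) (some (i + 2))) none none (-1)).getD []))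
    (PySem.List.slice a none (some 1))
  PySem.Str.join "" out

-- ===== PRECONDITION & SPEC =====
def Spec_fm_even_condition (l : List String) (out : String) : Prop := out = fm_even_condition_alt l
instance (l : List String) (out : String) : Decidable (Spec_fm_even_condition l out) := by unfold Spec_fm_even_condition; infer_instance

-- ===== CLAIM (what is proved, stated in full; the proofs are below) =====
def Claim_equal_fm_even_condition : Prop := ∀ (l : List String), Dom_fm_even_condition l → Spec_fm_even_condition l (fm_even_condition l)

-- ===== LEMMAS AND PROOFS =====

-- canonical result: first element kept, then adjacent pairs swapped
def pvSwapEven : List String → List String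
  | x :: y :: t => y :: x :: pvSwapEven t
  | l => l

def pvHeadKeep : List String → List String
  | [] => []
  | x :: r => x :: pvSwapEven r

-- range(a, b, 2) unfolds one element at a time
lemma pvPyRange_two_cons (a b : Int) (h : a < b) :
    PySem.List.pyRange a b 2 = a :: PySem.List.pyRange (a + 2) b 2 := by
  rw [PySem.List.pyRange_of_pos _ _ (by norm_num : (0:Int) < 2),
      PySem.List.pyRange_of_pos _ _ (by norm_num : (0:Int) < 2)]
  have hm : (if a < b then ((b - a + 2 - 1) / 2).toNat else 0)
      = (if a + 2 < b then ((b - (a + 2) + 2 - 1) / 2).toNat else 0) + 1 := by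
    split_ifs <;> omega
  rw [hm, List.range_succ_eq_map, List.map_cons, List.map_map]
  refine congrArg₂ _ (by ring) (List.map_congr_left ?_)
  intro k _
  simp [Nat.succ_eq_add_one, Function.comp]
  ring

-- the body of A's loop
def pvF (a : List String) (value : Int) : List String :=
  if PySem.Int.mod value 2 = 1 then
    let temp := PySem.List.pyGetD a value ""
    let a := PySem.List.pySetD a value (PySem.List.pyGetD a (value + 1) "")
    let a := PySem.List.pySetD a (value + 1) temp
    a
  else a

-- writing / reading past an untouched prefix
lemma pvSetAppend {α : Type} (pre l : List α) (k : Nat) (v : α) :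
    (pre ++ l).set (pre.length + k) v = pre ++ l.set k v := by
  rw [List.set_append, if_neg (by omega)]
  congr 2
  omega

lemma pvGetDAppend {α : Type} (pre l : List α) (k : Nat) (d : α) :
    (pre ++ l).getD (pre.length + k) d = l.getD k d := by
  rw [List.getD_eq_getElem?_getD, List.getElem?_append_right (Nat.le_add_right _ _),
      Nat.add_sub_cancel_left, ← List.getD_eq_getElem?_getD]

-- A's loop, started after an even-length already-processed prefix, swaps the rest pairwise
lemma pvA_run (n : Nat) : ∀ (cur pre : List String), cur.length ≤ n → pre.length % 2 = 0 →
    (PySem.List.pyRange (pre.length : Int) ((pre.length : Int) + (cur.length : Int) - 1) 1).foldl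
        pvF (pre ++ cur)
      = pre ++ pvHeadKeep cur := by
  induction n with
  | zero =>
    intro cur pre hlen _
    have : cur = [] := List.eq_nil_of_length_eq_zero (Nat.le_zero.mp hlen)
    subst this
    simp [PySem.List.pyRange_one_eq_nil (by omega : ((pre.length : Int) - 1) ≤ pre.length),
      pvHeadKeep]
  | succ n ih =>
    intro cur pre hlen hpre
    match cur with
    | [] =>
      simp [pvHeadKeep]
    | [x] =>
      simp [pvHeadKeep, pvSwapEven]
    | [x, y] =>
      rw [PySem.List.pyRange_one_cons (by simp; omega),
          PySem.List.pyRange_one_eq_nil (by simp; omega)]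
      have hskip : pvF (pre ++ [x, y]) (pre.length : Int) = pre ++ [x, y] := by
        simp only [pvF]
        rw [if_neg]
        rw [PySem.Int.mod_eq_emod_of_pos (by norm_num : (0:Int) < 2)]
        omega
      simp [hskip, pvHeadKeep, pvSwapEven]
    | x :: y :: z :: t =>
      have hcons1 : PySem.List.pyRange (pre.length : Int) ((pre.length : Int) + ((x :: y :: z :: t).length : Int) - 1) 1
          = (pre.length : Int) :: PySem.List.pyRange ((pre.length : Int) + 1) ((pre.length : Int) + ((x :: y :: z :: t).length : Int) - 1) 1 :=
        PySem.List.pyRange_one_cons (by simp; omega)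
      have hcons2 : PySem.List.pyRange ((pre.length : Int) + 1) ((pre.length : Int) + ((x :: y :: z :: t).length : Int) - 1) 1
          = ((pre.length : Int) + 1) :: PySem.List.pyRange ((pre.length : Int) + 2) ((pre.length : Int) + ((x :: y :: z :: t).length : Int) - 1) 1 := by
        have h := PySem.List.pyRange_one_cons
          (a := (pre.length : Int) + 1) (b := (pre.length : Int) + ((x :: y :: z :: t).length : Int) - 1)
          (by simp; omega)
        rwa [show ((pre.length : Int) + 1 + 1) = (pre.length : Int) + 2 by ring] at h
      -- step 1: index pre.length is even, nothing happens
      have hskip : pvF (pre ++ x :: y :: z :: t) (pre.length : Int) = pre ++ x :: y :: z :: t := by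
        simp only [pvF]
        rw [if_neg]
        rw [PySem.Int.mod_eq_emod_of_pos (by norm_num : (0:Int) < 2)]
        omega
      -- step 2: index pre.length+1 is odd, y and z are swapped
      have hswap : pvF (pre ++ x :: y :: z :: t) ((pre.length : Int) + 1) = (pre ++ [x, z]) ++ y :: t := by
        have hmod : PySem.Int.mod ((pre.length : Int) + 1) 2 = 1 := by
          rw [PySem.Int.mod_eq_emod_of_pos (by norm_num : (0:Int) < 2)]
          omega
        have hget1 : PySem.List.pyGetD (pre ++ x :: y :: z :: t) ((pre.length : Int) + 1) "" = y := by
          rw [show ((pre.length : Int) + 1) = ((pre.length + 1 : Nat) : Int) by push_cast; ring,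
              PySem.List.pyGetD_natCast, pvGetDAppend]
          rfl
        have hget2 : PySem.List.pyGetD (pre ++ x :: y :: z :: t) ((pre.length : Int) + 1 + 1) "" = z := by
          rw [show ((pre.length : Int) + 1 + 1) = ((pre.length + 2 : Nat) : Int) by push_cast; ring,
              PySem.List.pyGetD_natCast, pvGetDAppend]
          rfl
        simp only [pvF]
        rw [if_pos hmod, hget1, hget2]
        rw [show ((pre.length : Int) + 1) = ((pre.length + 1 : Nat) : Int) by push_cast; ring]
        rw [show (((pre.length + 1 : Nat) : Int) + 1) = ((pre.length + 2 : Nat) : Int) by push_cast; ring]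
        rw [PySem.List.pySetD_natCast, PySem.List.pySetD_natCast, pvSetAppend, pvSetAppend]
        simp
      rw [hcons1, List.foldl_cons, hskip, hcons2, List.foldl_cons, hswap]
      have ih' := ih (y :: t) (pre ++ [x, z]) (by simp at hlen ⊢; omega)
        (by simp [hpre])
      have ha : ((pre ++ [x, z]).length : Int) = (pre.length : Int) + 2 := by simp
      rw [ha] at ih'
      rw [show ((pre.length : Int) + 2 + ((y :: t).length : Int) - 1)
          = (pre.length : Int) + ((x :: y :: z :: t).length : Int) - 1 by simp; ring] at ih'
      rw [ih']
      simp [pvHeadKeep, pvSwapEven]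

-- the body of B's loop
def pvG (a : List String) (out : List String) (i : Int) : List String :=
  out ++ ((PySem.List.slice? (PySem.List.slice a (some i) (some (i + 2))) none none (-1)).getD [])

-- B's loop from index j appends the pairwise-swapped suffix a.drop j
lemma pvB_run (n : Nat) : ∀ (j : Nat) (a out : List String), a.length - j ≤ n →
    (PySem.List.pyRange (j : Int) (a.length : Int) 2).foldl (pvG a) out
      = out ++ pvSwapEven (a.drop j) := by
  induction n with
  | zero =>
    intro j a out hle
    have hj : a.length ≤ j := by omega
    rw [show PySem.List.pyRange (j : Int) (a.length : Int) 2 = [] from by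
      rw [PySem.List.pyRange_of_pos _ _ (by norm_num : (0:Int) < 2)]
      rw [if_neg (by omega : ¬ ((j:Int) < (a.length : Int)))]
      simp]
    simp [List.drop_eq_nil_of_le hj, pvSwapEven]
  | succ n ih =>
    intro j a out hle
    by_cases hj : a.length ≤ j
    · rw [show PySem.List.pyRange (j : Int) (a.length : Int) 2 = [] from by
        rw [PySem.List.pyRange_of_pos _ _ (by norm_num : (0:Int) < 2)]
        rw [if_neg (by omega : ¬ ((j:Int) < (a.length : Int)))]
        simp]
      simp [List.drop_eq_nil_of_le hj, pvSwapEven]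
    · rw [not_le] at hj
      rw [pvPyRange_two_cons _ _ (by omega : (j:Int) < (a.length:Int)), List.foldl_cons]
      have hslice : PySem.List.slice a (some (j : Int)) (some ((j : Int) + 2))
          = (a.drop j).take 2 := by
        rw [show ((j : Int) + 2) = ((j + 2 : Nat) : Int) by push_cast; ring,
            PySem.List.slice_natCast]
        congr 1
        omega
      have hdrop : a.drop j ≠ [] := by
        intro h
        have := List.drop_eq_nil_iff.mp h
        omega
      obtain ⟨x, r, hxr⟩ := List.exists_cons_of_ne_nil hdrop
      match r, hxr with
      | [], hxr =>
        -- lone trailing element: j = a.length - 1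
        have hlen1 : a.length - j = 1 := by
          have := congrArg List.length hxr
          simp at this; omega
        have hG : pvG a out (j : Int) = out ++ [x] := by
          simp [pvG, hslice, hxr, PySem.List.slice?_none_none_neg_one]
        rw [hG]
        rw [show PySem.List.pyRange ((j : Int) + 2) (a.length : Int) 2 = [] from by
          rw [PySem.List.pyRange_of_pos _ _ (by norm_num : (0:Int) < 2)]
          rw [if_neg (by omega : ¬ ((j:Int) + 2 < (a.length : Int)))]
          simp]
        simp [hxr, pvSwapEven]
      | y :: t, hxr =>
        have hG : pvG a out (j : Int) = out ++ [y, x] := by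
          simp [pvG, hslice, hxr, PySem.List.slice?_none_none_neg_one]
        rw [hG, show ((j : Int) + 2) = ((j + 2 : Nat) : Int) by push_cast; ring]
        rw [ih (j + 2) a (out ++ [y, x]) (by omega)]
        have ht : a.drop (j + 2) = t := by
          have h2 : List.drop 2 (a.drop j) = t := by rw [hxr]; rfl
          rwa [List.drop_drop] at h2
        rw [ht, hxr]
        simp [pvSwapEven]

-- both ports produce pvHeadKeep l before joining
lemma pvA_eq (l : List String) :
    fm_even_condition l = PySem.Str.join "" (pvHeadKeep l) := by
  have h := pvA_run l.length l [] (le_refl _) (by simp)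
  simp only [List.length_nil, Nat.cast_zero, List.nil_append, zero_add] at h
  show PySem.Str.join "" (List.foldl pvF l (PySem.List.pyRange 0 ((l.length : Int) - 1) 1))
      = PySem.Str.join "" (pvHeadKeep l)
  rw [h]

lemma pvB_eq (l : List String) :
    fm_even_condition_alt l = PySem.Str.join "" (pvHeadKeep l) := by
  have h := pvB_run l.length 1 l (PySem.List.slice l none (some 1)) (by omega)
  simp only [Nat.cast_one] at h
  show PySem.Str.join "" (List.foldl (pvG l) (PySem.List.slice l none (some 1))
        (PySem.List.pyRange 1 ((l.length : Int)) 2))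
      = PySem.Str.join "" (pvHeadKeep l)
  rw [h, PySem.List.slice_to l (by norm_num : (0:Int) ≤ 1)]
  match l with
  | [] => simp [pvHeadKeep, pvSwapEven]
  | x :: r => simp [pvHeadKeep]

-- ===== VERDICT (by name: the statement is the Claim_ definition above) =====
theorem fm_even_condition_spec : Claim_equal_fm_even_condition := by
  intro l _
  unfold Spec_fm_even_condition
  rw [pvA_eq, pvB_eq]
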